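-- pv_equiv track=rewrite | github.com/Mig1a/DSA-Solution | Unit 2/sess-1/P 7- Performances with Maximum Audience II.py | max_audience_performances
-- ===== SOURCE A (Python) =====
-- def max_audience_performances(audiences):
--     res = {}
--
--     for i in audiences:
--         if i in res:
--             res[i] += 1
--         else:
--             res[i] = 1
--     so = sorted(res.items(), key=lambda x:x[0], reverse=True)
--
--     return so[0][0] * so[0][1]
-- ===== SOURCE B (Python) =====
-- def max_audience_performances(audiences):
--     m = max(audiences)
--     return m * audiences.count(m)
-- ===== Notes on version B (the rewrite author's own statement) =====
-- stated objective: simpler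
-- what changed: B drops the frequency dictionary and the descending sort of its items: it takes max(audiences) directly and multiplies by one count() pass.
import Mathlib
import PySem

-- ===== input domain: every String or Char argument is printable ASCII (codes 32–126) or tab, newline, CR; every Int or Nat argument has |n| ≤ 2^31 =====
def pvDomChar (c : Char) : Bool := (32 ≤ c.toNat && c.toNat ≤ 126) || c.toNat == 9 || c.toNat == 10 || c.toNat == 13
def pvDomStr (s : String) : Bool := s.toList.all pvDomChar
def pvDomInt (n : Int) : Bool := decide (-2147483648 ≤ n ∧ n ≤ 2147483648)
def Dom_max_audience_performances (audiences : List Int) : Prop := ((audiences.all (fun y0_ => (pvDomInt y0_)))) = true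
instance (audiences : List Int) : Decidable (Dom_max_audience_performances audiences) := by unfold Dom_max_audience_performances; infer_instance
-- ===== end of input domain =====

-- B drops the frequency dictionary and the descending sort: it takes the maximum
-- directly and multiplies by a single count pass (simpler).


-- ===== PORT A =====
-- res = {}; for i in audiences: if i in res: res[i] += 1 else: res[i] = 1
-- so = sorted(res.items(), key=lambda x: x[0], reverse=True); return so[0][0] * so[0][1]
def max_audience_performances (audiences : List Int) : Int :=
  let res : PySem.Dict Int Int :=
    audiences.foldl
      (fun d i => if d.contains i then d.modify i 0 (· + 1) else d.insert i 1)
      PySem.Dict.empty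
  let so := PySem.List.sorted res.items (fun x => x.1) true
  match PySem.List.pyGet? so 0 with   -- so[0]: IndexError on the empty list (excluded by Pre_)
  | some p => p.1 * p.2
  | none => 0

-- ===== PORT B =====
-- m = max(audiences); return m * audiences.count(m)
def max_audience_performances_alt (audiences : List Int) : Int :=
  match PySem.List.max? audiences (fun y => y) with   -- max([]) raises ValueError (excluded by Pre_)
  | some m => m * PySem.List.count audiences m
  | none => 0

-- ===== PRECONDITION & SPEC =====
-- Pre_ excludes only the empty list, on which A raises IndexError (and B raises ValueError).
def Pre_max_audience_performances (audiences : List Int) : Prop := audiences ≠ []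
instance (audiences : List Int) : Decidable (Pre_max_audience_performances audiences) := by unfold Pre_max_audience_performances; infer_instance
def pvWitness_max_audience_performances : List Int := [3, 1, 3, 2]

def Spec_max_audience_performances (audiences : List Int) (out : Int) : Prop := out = max_audience_performances_alt audiences
instance (audiences : List Int) (out : Int) : Decidable (Spec_max_audience_performances audiences out) := by unfold Spec_max_audience_performances; infer_instance

-- ===== CLAIM (what is proved, stated in full; the proofs are below) =====
def Claim_equal_max_audience_performances : Prop := ∀ (audiences : List Int), Dom_max_audience_performances audiences → Pre_max_audience_performances audiences → Spec_max_audience_performances audiences (max_audience_performances audiences)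

-- ===== LEMMAS AND PROOFS =====

-- A's if/else loop body is exactly Counter's modify step, so A's dict is Counter(audiences).
theorem loop_eq_counter (audiences : List Int) :
    audiences.foldl
      (fun d i => if d.contains i then d.modify i 0 (· + 1) else d.insert i 1)
      PySem.Dict.empty = PySem.Dict.counter audiences := by
  rw [PySem.Dict.counter_eq_foldl]
  have hf : (fun (d : PySem.Dict Int Int) i =>
      if d.contains i then d.modify i 0 (· + 1) else d.insert i 1)
      = (fun (d : PySem.Dict Int Int) x => d.modify x 0 (· + 1)) := by
    funext d i
    by_cases h : d.contains i = true
    · simp [h]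
    · simp only [Bool.not_eq_true] at h
      rw [if_neg (by simp [h]),
          show d.modify i 0 (· + 1) = d.insert i (d.getD i 0 + 1) from rfl,
          PySem.Dict.getD_of_not_contains d 0 h]
      norm_num
  rw [hf]

-- ===== VERDICT (by name: the statement is the Claim_ definition above) =====
theorem max_audience_performances_spec : Claim_equal_max_audience_performances := by
  intro audiences _ hne
  unfold Spec_max_audience_performances
  unfold max_audience_performances max_audience_performances_alt
  simp only [loop_eq_counter]
  -- B's side: max? on a nonempty list returns the (first) maximum m
  obtain ⟨m, hm⟩ : ∃ m, PySem.List.max? audiences (fun y => y) = some m := by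
    cases h : PySem.List.max? audiences (fun y => y) with
    | none => exact absurd ((PySem.List.max?_eq_none_iff _ _).mp h) hne
    | some m => exact ⟨m, rfl⟩
  have hmmem : m ∈ audiences := PySem.List.max?_mem hm
  have hmmax : ∀ y ∈ audiences, y ≤ m := fun y hy => PySem.List.max?_isMax hm y hy
  -- A's side: the descending sort of Counter(audiences).items is nonempty and its head is (m, count m)
  cases hso : PySem.List.sorted (PySem.Dict.counter audiences).items (fun x => x.1) true with
  | nil =>
      exfalso
      have h0 := (PySem.List.sorted_eq_nil_iff _ _ _).mp hso
      rw [PySem.Dict.items_counter] at h0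
      have h1 : m ∈ PySem.Set.ofList audiences := (PySem.Set.mem_ofList _ _).mpr hmmem
      have h2 : (m, (audiences.count m : Int)) ∈
          (PySem.Set.ofList audiences).map (fun k => (k, (audiences.count k : Int))) :=
        List.mem_map.mpr ⟨m, h1, rfl⟩
      rw [h0] at h2
      simp at h2
  | cons p t =>
      have hperm := PySem.List.sorted_perm (PySem.Dict.counter audiences).items
        (fun x : Int × Int => x.1) true
      rw [hso] at hperm
      have hpmem : p ∈ (PySem.Dict.counter audiences).items :=
        hperm.mem_iff.mp List.mem_cons_self
      rw [PySem.Dict.items_counter] at hpmem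
      obtain ⟨k, hk, hpk⟩ := List.mem_map.mp hpmem
      have hkmem : k ∈ audiences := (PySem.Set.mem_ofList _ _).mp hk
      have hge := PySem.List.key_head_sorted_rev_ge
        (PySem.Dict.counter audiences).items (fun x : Int × Int => x.1) hso
      have hmitem : ((m : Int), (audiences.count m : Int)) ∈ (PySem.Dict.counter audiences).items := by
        rw [PySem.Dict.items_counter]
        exact List.mem_map.mpr ⟨m, (PySem.Set.mem_ofList _ _).mpr hmmem, rfl⟩
      have h1 : m ≤ p.1 := hge _ hmitem
      have hp1 : p.1 = k := by rw [← hpk]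
      have h2 : p.1 ≤ m := by rw [hp1]; exact hmmax k hkmem
      have hkm : k = m := by omega
      have hp : p = (m, (audiences.count m : Int)) := by rw [← hpk, hkm]
      simp [PySem.List.pyGet?, PySem.List.pyIdx?, hm, hp, PySem.List.count_eq]
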